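-- pv_equiv track=rewrite | github.com/robotsa666/cost1.0 | backend/app.py | validate_tree
-- ===== SOURCE A (Python) =====
-- from collections import defaultdict
-- from typing import Dict, Iterable, List, Optional, Sequence, Tuple
--
-- def validate_tree(coa_rows: List[Dict[str, str]]):
--     msgs: List[str] = []
--     ids: List[str] = [str(r["account_id"]).strip() for r in coa_rows]
--     parents: List[str] = [str((r.get("parent_id") or "")).strip() for r in coa_rows]
--
--     seen: Dict[str, int] = defaultdict(int)
--     dups: List[str] = []
--     for i in ids:
--         seen[i] += 1
--         if seen[i] == 2:
--             dups.append(i)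
--     if dups:
--         msgs.append(f"Zduplikowane identyfikatory kont: {sorted(dups)}")
--
--     idset = set(ids)
--     bad_parents = sorted({p for p in parents if p and p not in idset})
--     if bad_parents:
--         msgs.append("Wskazano parent_id, których nie ma w wykazie kont: " + ", ".join(bad_parents))
--
--     children: Dict[str, List[str]] = defaultdict(list)
--     for acc, par in zip(ids, parents):
--         children[par].append(acc)
--
--     visiting: set[str] = set()
--     visited: set[str] = set()
--
--     def dfs(node: str) -> bool:
--         if node in visiting:
--             return True
--         if node in visited:
--             return False
--         visiting.add(node)
--         for ch in children.get(node, []):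
--             if dfs(ch):
--                 return True
--         visiting.remove(node)
--         visited.add(node)
--         return False
--
--     has_cycle = False
--     roots = set(parents) | {""}
--     for r in roots:
--         if dfs(r):
--             has_cycle = True
--             break
--     if has_cycle:
--         msgs.append("Wykryto cykl w strukturze kont. Upewnij się, że drzewo nie zawiera zapętleń.")
--
--     return (len(msgs) == 0, msgs)
-- ===== SOURCE B (Python) =====
-- from collections import defaultdict
-- from typing import Dict, List
--
--
-- def validate_tree(coa_rows: List[Dict[str, str]]):
--     msgs: List[str] = []
--     ids: List[str] = [str(r["account_id"]).strip() for r in coa_rows]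
--     parents: List[str] = [str((r.get("parent_id") or "")).strip() for r in coa_rows]
--
--     # duplicates: build the counts once, then filter
--     counts: Dict[str, int] = {}
--     for i in ids:
--         counts[i] = counts.get(i, 0) + 1
--     dups = sorted(k for k, c in counts.items() if c >= 2)
--     if dups:
--         msgs.append(f"Zduplikowane identyfikatory kont: {dups}")
--
--     idset = set(ids)
--     bad_parents = sorted(set(parents) - idset - {""})
--     if bad_parents:
--         msgs.append("Wskazano parent_id, których nie ma w wykazie kont: " + ", ".join(bad_parents))
--
--     children: Dict[str, List[str]] = defaultdict(list)
--     for acc, par in zip(ids, parents):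
--         children[par].append(acc)
--
--     visiting: set = set()
--     visited: set = set()
--
--     def has_cycle_from(root: str) -> bool:
--         # iterative three-colour DFS with an explicit stack of frames
--         stack = [("enter", root, [])]
--         while stack:
--             tag, node, rest = stack.pop()
--             if tag == "enter":
--                 if node in visiting:
--                     return True
--                 if node in visited:
--                     continue
--                 visiting.add(node)
--                 stack.append(("resume", node, children.get(node, [])))
--             else:
--                 if rest:
--                     stack.append(("resume", node, rest[1:]))
--                     stack.append(("enter", rest[0], []))
--                 else:
--                     visiting.discard(node)
--                     visited.add(node)
--         return False
--
--     has_cycle = any(has_cycle_from(r) for r in set(parents) | {""})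
--     if has_cycle:
--         msgs.append("Wykryto cykl w strukturze kont. Upewnij się, że drzewo nie zawiera zapętleń.")
--
--     return (len(msgs) == 0, msgs)
-- ===== Notes on version B (the rewrite author's own statement) =====
-- stated objective: alternative
-- what changed: Cycle detection is rewritten as an iterative three-colour DFS over an explicit frame stack (no Python recursion, so deep trees cannot hit the recursion limit); the duplicate pass builds the count table once and then filters it instead of appending on the second occurrence; the bad-parent pass uses set difference instead of a filtering set comprehension.
import Mathlib
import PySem

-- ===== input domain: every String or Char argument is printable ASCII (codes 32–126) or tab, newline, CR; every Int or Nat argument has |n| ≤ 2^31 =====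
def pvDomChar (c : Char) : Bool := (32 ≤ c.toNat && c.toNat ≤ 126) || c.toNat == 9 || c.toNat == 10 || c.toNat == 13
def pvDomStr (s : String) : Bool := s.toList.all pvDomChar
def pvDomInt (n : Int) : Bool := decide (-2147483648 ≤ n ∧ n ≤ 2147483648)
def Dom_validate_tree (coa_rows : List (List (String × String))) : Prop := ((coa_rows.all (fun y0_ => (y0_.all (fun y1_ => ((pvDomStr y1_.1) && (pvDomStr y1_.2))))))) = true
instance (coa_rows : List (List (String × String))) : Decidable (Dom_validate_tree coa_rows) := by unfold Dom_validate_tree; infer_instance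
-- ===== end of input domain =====

-- B replaces the recursive three-colour DFS by an explicit-stack iterative one, builds the duplicate
-- counts once and filters them, and computes bad parents by set difference (objective: alternative;
-- same asymptotic cost).

-- ----- helpers shared by both ports (identical lines of both Pythons) -----

-- str(r["account_id"]).strip() for each row (total via getD ""; Pre_ excludes the KeyError rows)
def pvIds (coa_rows : List (List (String × String))) : List String :=
  coa_rows.map (fun r => PySem.Str.strip (((PySem.Dict.mk r).get? "account_id").getD ""))

-- str((r.get("parent_id") or "")).strip(): a missing key and a falsy "" both give ""
def pvParents (coa_rows : List (List (String × String))) : List String :=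
  coa_rows.map (fun r => PySem.Str.strip ((PySem.Dict.mk r).getD "parent_id" ""))

-- children[par].append(acc)  (defaultdict(list): d[k] = d.get(k, []) ++ [acc])
def pvChildren (ids parents : List String) : PySem.Dict String (List String) :=
  (ids.zip parents).foldl (fun d ap => d.modify ap.2 [] (· ++ [ap.1])) PySem.Dict.empty

-- repr() of one string, exact on the domain's characters (printable ASCII plus \t \n \r):
-- backslash and \t \n \r are escaped; quote is ' unless the string has a ' and no "
def pvReprStr (s : String) : String :=
  let cs := s.toList
  let q : Char := if cs.contains '\'' && !cs.contains '"' then '"' else '\''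
  String.mk ([q] ++ cs.flatMap (fun c =>
    if c = '\\' then ['\\', '\\']
    else if c = '\t' then ['\\', 't']
    else if c = '\n' then ['\\', 'n']
    else if c = '\r' then ['\\', 'r']
    else if c = q then ['\\', q]
    else [c]) ++ [q])

-- repr() of a list of strings, as the f-string renders it
def pvReprList (l : List String) : String :=
  String.mk ('['.toString.toList ++ (PySem.Str.join ", " (l.map pvReprStr)).toList ++ [']'])

def pvDupsMsg (l : List String) : String :=
  String.mk ("Zduplikowane identyfikatory kont: ".toList ++ (pvReprList l).toList)

def pvBadMsg (l : List String) : String :=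
  String.mk ("Wskazano parent_id, których nie ma w wykazie kont: ".toList ++ (PySem.Str.join ", " l).toList)

def pvCycleMsg : String := "Wykryto cykl w strukturze kont. Upewnij się, że drzewo nie zawiera zapętleń."

-- (visiting, visited)
abbrev PVSt := PySem.Set String × PySem.Set String

-- ===== PORT A =====

-- A's recursive dfs/child loop, with a threaded fuel counter as the totality device (each call
-- consumes one unit; fuel 0 is never reached for the initial fuel the port passes).
-- visiting.remove(node) is ported as discard: the node is always a member at that line.
mutual
def pvDfsA (ch : PySem.Dict String (List String)) : Nat → String → PVSt → Bool × PVSt × Nat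
  | 0, _, st => (true, st, 0)
  | f + 1, n, (vg, vd) =>
    if PySem.Set.contains vg n then (true, (vg, vd), f)
    else if PySem.Set.contains vd n then (false, (vg, vd), f)
    else
      match pvLoopA ch f (ch.getD n []) (PySem.Set.add vg n, vd) with
      | (true, st', f') => (true, st', f')
      | (false, (vg2, vd2), f') => (false, (PySem.Set.discard vg2 n, PySem.Set.add vd2 n), f')
  termination_by f _ _ => (f, 0)
  decreasing_by exact Prod.Lex.left _ _ (Nat.lt_succ_self f)

def pvLoopA (ch : PySem.Dict String (List String)) : Nat → List String → PVSt → Bool × PVSt × Nat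
  | f, [], st => (false, st, f)
  | f, c :: cs, st =>
    match pvDfsA ch f c st with
    | (true, st', f') => (true, st', f')
    | (false, st', f') => pvLoopA ch (min f' f) cs st'   -- min: totality only; f' ≤ f always
  termination_by f l _ => (f, 2 * l.length + 1)
  decreasing_by
    · exact Prod.Lex.right _ (by simp [List.length_cons])
    · rcases Nat.lt_or_ge (min f' f) f with h | h
      · exact Prod.Lex.left _ _ h
      · have h2 : min f' f = f := Nat.le_antisymm (Nat.min_le_right _ _) h
        rw [h2]; exact Prod.Lex.right _ (by simp [List.length_cons])
end


def pvRootsA (ch : PySem.Dict String (List String)) : Nat → List String → PVSt → Bool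
  | _, [], _ => false
  | f, r :: rs, st =>
    match pvDfsA ch f r st with
    | (true, _, _) => true
    | (false, st', f') => pvRootsA ch f' rs st'

def validate_tree (coa_rows : List (List (String × String))) : Bool × List String :=
  let ids := pvIds coa_rows
  let parents := pvParents coa_rows
  -- seen[i] += 1; if seen[i] == 2: dups.append(i)
  let sd := ids.foldl (fun (sd : PySem.Dict String Int × List String) i =>
      let seen := sd.1.modify i 0 (· + 1)
      if seen.getD i 0 == 2 then (seen, sd.2 ++ [i]) else (seen, sd.2))
    (PySem.Dict.empty, [])
  let dups := sd.2
  let msgs1 : List String :=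
    if dups = [] then [] else [pvDupsMsg (PySem.List.sorted dups (fun x => x) false)]
  let idset := PySem.Set.ofList ids
  -- sorted({p for p in parents if p and p not in idset})
  let bad := PySem.List.sorted
    (PySem.Set.ofList (parents.filter (fun p => !(p == "") && !(PySem.Set.contains idset p))))
    (fun x => x) false
  let msgs2 : List String := if bad = [] then [] else [pvBadMsg bad]
  let children := pvChildren ids parents
  let roots := PySem.Set.union (PySem.Set.ofList parents) [""]
  let hasCycle := pvRootsA children (4 * coa_rows.length + 8) roots (PySem.Set.empty, PySem.Set.empty)
  let msgs := msgs1 ++ msgs2 ++ (if hasCycle then [pvCycleMsg] else [])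
  (msgs.length == 0, msgs)

-- ===== PORT B =====

-- a stack frame of B's iterative DFS: ("enter", node, []) or ("resume", node, rest)
inductive PVFrame : Type
  | enter : String → PVFrame
  | resume : String → List String → PVFrame
deriving DecidableEq, Repr

def pvWeight : PVFrame → Nat
  | .enter _ => 1
  | .resume _ chs => 2 * chs.length + 2

def pvStackWeight (k : List PVFrame) : Nat := (k.map pvWeight).sum

-- B's while-loop over the explicit stack; fuel (consumed on "enter" steps only) is the totality
-- device, and the state/remaining fuel are returned so the caller's loop can continue (Python
-- mutates the shared visiting/visited sets instead).
def pvRunB (ch : PySem.Dict String (List String)) (f : Nat) (k : List PVFrame) (st : PVSt) :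
    Bool × PVSt × Nat :=
  match k, f with
  | [], f => (false, st, f)
  | .resume n [] :: k, f => pvRunB ch f k (PySem.Set.discard st.1 n, PySem.Set.add st.2 n)
  | .resume n (c :: cs) :: k, f => pvRunB ch f (.enter c :: .resume n cs :: k) st
  | .enter _ :: _, 0 => (true, st, 0)
  | .enter n :: k, f + 1 =>
    if PySem.Set.contains st.1 n then (true, st, f)
    else if PySem.Set.contains st.2 n then pvRunB ch f k st
    else pvRunB ch f (.resume n (ch.getD n []) :: k) (PySem.Set.add st.1 n, st.2)
termination_by (f, pvStackWeight k)
decreasing_by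
  all_goals simp [pvStackWeight, pvWeight]
  all_goals omega

-- any(has_cycle_from(r) for r in roots)
def pvRootsB (ch : PySem.Dict String (List String)) : Nat → List String → PVSt → Bool
  | _, [], _ => false
  | f, r :: rs, st =>
    match pvRunB ch f [.enter r] st with
    | (true, _, _) => true
    | (false, st', f') => pvRootsB ch f' rs st'

def validate_tree_alt (coa_rows : List (List (String × String))) : Bool × List String :=
  let ids := pvIds coa_rows
  let parents := pvParents coa_rows
  -- counts built once, then filtered
  let counts := ids.foldl (fun (d : PySem.Dict String Int) i => d.insert i (d.getD i 0 + 1))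
    PySem.Dict.empty
  let dups := PySem.List.sorted ((counts.items.filter (fun kv => 2 ≤ kv.2)).map (·.1))
    (fun x => x) false
  let msgs1 : List String := if dups = [] then [] else [pvDupsMsg dups]
  let idset := PySem.Set.ofList ids
  -- sorted(set(parents) - idset - {""})
  let bad := PySem.List.sorted
    (PySem.Set.diff (PySem.Set.diff (PySem.Set.ofList parents) idset) [""]) (fun x => x) false
  let msgs2 : List String := if bad = [] then [] else [pvBadMsg bad]
  let children := pvChildren ids parents
  let roots := PySem.Set.union (PySem.Set.ofList parents) [""]
  let hasCycle := pvRootsB children (4 * coa_rows.length + 8) roots (PySem.Set.empty, PySem.Set.empty)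
  let msgs := msgs1 ++ msgs2 ++ (if hasCycle then [pvCycleMsg] else [])
  (msgs.length == 0, msgs)

-- ===== PRECONDITION & SPEC =====

-- Pre_ excludes exactly the rows without an "account_id" key, on which Python A raises KeyError.
def Pre_validate_tree (coa_rows : List (List (String × String))) : Prop :=
  (coa_rows.all (fun r => (PySem.Dict.mk r).contains "account_id")) = true
instance (coa_rows : List (List (String × String))) : Decidable (Pre_validate_tree coa_rows) := by
  unfold Pre_validate_tree; infer_instance

def pvWitness_validate_tree : (List (List (String × String))) :=
  [[("account_id", "1"), ("parent_id", "")], [("account_id", "2"), ("parent_id", "1")]]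

def Spec_validate_tree (coa_rows : List (List (String × String))) (out : Bool × List String) : Prop :=
  out = validate_tree_alt coa_rows
instance (coa_rows : List (List (String × String))) (out : Bool × List String) :
    Decidable (Spec_validate_tree coa_rows out) := by
  unfold Spec_validate_tree; infer_instance

-- ===== CLAIM (what is proved, stated in full; the proofs are below) =====
def Claim_equal_validate_tree : Prop := ∀ (coa_rows : List (List (String × String))),
  Dom_validate_tree coa_rows → Pre_validate_tree coa_rows →
  Spec_validate_tree coa_rows (validate_tree coa_rows)

-- ===== LEMMAS AND PROOFS =====

-- ---- fuel bookkeeping: the threaded fuel never grows ----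
lemma pv_fuel (ch : PySem.Dict String (List String)) : ∀ f : Nat,
    (∀ n st, (pvDfsA ch f n st).2.2 ≤ f) ∧
    (∀ g, g ≤ f → ∀ cs st, (pvLoopA ch g cs st).2.2 ≤ g) := by
  intro f
  induction f using Nat.strong_induction_on with
  | _ f IH =>
    have hdfs : ∀ n st, (pvDfsA ch f n st).2.2 ≤ f := by
      intro n st
      match f, st with
      | 0, st => simp [pvDfsA]
      | f + 1, (vg, vd) =>
        rw [pvDfsA]
        split_ifs with h1 h2
        · simp
        · simp
        · have hl := (IH f (Nat.lt_succ_self f)).2 f (le_refl f) (ch.getD n [])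
            (PySem.Set.add vg n, vd)
          rcases hE : pvLoopA ch f (ch.getD n []) (PySem.Set.add vg n, vd) with ⟨b, ⟨vg2, vd2⟩, f2⟩
          rw [hE] at hl; simp at hl
          cases b <;> simp [hE] <;> omega
    refine ⟨hdfs, ?_⟩
    intro g hg cs
    induction cs generalizing g with
    | nil => intro st; simp [pvLoopA]
    | cons c cs IHcs =>
      intro st
      rw [pvLoopA]
      have hd : (pvDfsA ch g c st).2.2 ≤ g := by
        rcases Nat.lt_or_ge g f with h | h
        · exact (IH g h).1 c st
        · have hgf : g = f := Nat.le_antisymm hg h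
          subst hgf; exact hdfs c st
      rcases hE : pvDfsA ch g c st with ⟨b, st', f'⟩
      rw [hE] at hd; simp at hd
      cases b
      · have := IHcs (min f' g) (le_trans (Nat.min_le_right f' g) hg) st'
        simpa [hE] using le_trans this (Nat.min_le_right f' g)
      · simpa [hE] using hd

lemma pvDfsA_fuel_le (ch : PySem.Dict String (List String)) (f : Nat) (n : String) (st : PVSt) :
    (pvDfsA ch f n st).2.2 ≤ f := (pv_fuel ch f).1 n st

-- ---- the stack machine runs A's recursion, frame for frame ----
lemma pv_sim (ch : PySem.Dict String (List String)) : ∀ f : Nat,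
    (∀ n k st, pvRunB ch f (.enter n :: k) st =
      match pvDfsA ch f n st with
      | (true, st', f') => (true, st', f')
      | (false, st', f') => pvRunB ch f' k st') ∧
    (∀ g, g ≤ f → ∀ n cs k st, pvRunB ch g (.resume n cs :: k) st =
      match pvLoopA ch g cs st with
      | (true, st', f') => (true, st', f')
      | (false, st', f') => pvRunB ch f' k (PySem.Set.discard st'.1 n, PySem.Set.add st'.2 n)) := by
  intro f
  induction f using Nat.strong_induction_on with
  | _ f IH =>
    have hL1 : ∀ n k st, pvRunB ch f (.enter n :: k) st =
        match pvDfsA ch f n st with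
        | (true, st', f') => (true, st', f')
        | (false, st', f') => pvRunB ch f' k st' := by
      intro n k st
      match f, st with
      | 0, st => simp [pvRunB, pvDfsA]
      | f + 1, (vg, vd) =>
        rw [pvRunB, pvDfsA]
        split_ifs with h1 h2
        · rfl
        · rfl
        · rw [(IH f (Nat.lt_succ_self f)).2 f (le_refl f)]
          rcases hE : pvLoopA ch f (ch.getD n []) (PySem.Set.add vg n, vd) with ⟨b, ⟨vg2, vd2⟩, f2⟩
          cases b <;> simp
    refine ⟨hL1, ?_⟩
    intro g hg n cs
    induction cs generalizing g with
    | nil => intro k st; rw [pvRunB.eq_def]; simp [pvLoopA]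
    | cons c cs IHcs =>
      intro k st
      have hL1g : ∀ n' k' st', pvRunB ch g (.enter n' :: k') st' =
          match pvDfsA ch g n' st' with
          | (true, st'', f') => (true, st'', f')
          | (false, st'', f') => pvRunB ch f' k' st'' := by
        rcases Nat.lt_or_ge g f with h | h
        · exact (IH g h).1
        · have hgf : g = f := Nat.le_antisymm hg h
          subst hgf; exact hL1
      rw [pvRunB, hL1g, pvLoopA]
      rcases hE : pvDfsA ch g c st with ⟨b, st', f'⟩
      have hle : f' ≤ g := by
        have := pvDfsA_fuel_le ch g c st
        rw [hE] at this; simpa using this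
      cases b
      · have hmin : min f' g = f' := Nat.min_eq_left hle
        simp only [hmin]
        exact IHcs f' (le_trans hle hg) k st'
      · simp

lemma pvRun_enter (ch : PySem.Dict String (List String)) (f : Nat) (n : String) (st : PVSt) :
    pvRunB ch f [PVFrame.enter n] st = pvDfsA ch f n st := by
  have h := (pv_sim ch f).1 n [] st
  rcases hE : pvDfsA ch f n st with ⟨b, st', f'⟩
  rw [hE] at h
  cases b
  · rw [h]
    show pvRunB ch f' [] st' = (false, st', f')
    rw [pvRunB.eq_def]
  · exact h

-- the two roots loops agree (identical fuel threading, dfs replaced by the machine)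
lemma pvRoots_eq (ch : PySem.Dict String (List String)) :
    ∀ rs f st, pvRootsA ch f rs st = pvRootsB ch f rs st := by
  intro rs
  induction rs with
  | nil => intro f st; rfl
  | cons r rs IH =>
    intro f st
    rw [pvRootsA, pvRootsB, pvRun_enter]
    rcases pvDfsA ch f r st with ⟨b, st', f'⟩
    cases b
    · exact IH f' st'
    · rfl

-- ---- duplicates: A's on-the-fly appending vs B's filtered counter ----
-- membership in A's dups accumulator: appended exactly when the running count passes 2
lemma pvDups_mem (l : List String) : ∀ (d : PySem.Dict String Int) (acc : List String) (x : String),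
    (x ∈ (l.foldl (fun (sd : PySem.Dict String Int × List String) i =>
        let seen := sd.1.modify i 0 (· + 1)
        if seen.getD i 0 == 2 then (seen, sd.2 ++ [i]) else (seen, sd.2)) (d, acc)).2)
    ↔ (x ∈ acc ∨ (d.getD x 0 ≤ 1 ∧ 2 ≤ d.getD x 0 + l.count x)) := by
  induction l with
  | nil =>
    intro d acc x
    simp only [List.foldl_nil, List.count_nil]
    by_cases hm : x ∈ acc <;> simp [hm]
  | cons i t IHt =>
    intro d acc x
    rw [List.foldl_cons]
    have hstep : (let seen := (d, acc).1.modify i 0 (· + 1)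
        if seen.getD i 0 == 2 then (seen, (d, acc).2 ++ [i]) else (seen, (d, acc).2)) =
        (if (d.modify i 0 (· + 1)).getD i 0 == 2 then (d.modify i 0 (· + 1), acc ++ [i])
         else (d.modify i 0 (· + 1), acc)) := by
      by_cases h : (d.modify i 0 (· + 1)).getD i 0 == 2 <;> simp [h]
    rw [hstep]
    have hgi : (d.modify i 0 (· + 1)).getD i 0 = d.getD i 0 + 1 := by
      simp [PySem.Dict.getD_modify_self]
    by_cases h2 : ((d.modify i 0 (· + 1)).getD i 0 == 2)
    · rw [if_pos h2, IHt]
      rw [hgi, beq_iff_eq] at h2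
      simp only [PySem.Dict.getD_modify, List.mem_append, List.mem_singleton, List.count_cons]
      by_cases hxi : x = i
      · subst hxi
        by_cases hm : x ∈ acc <;> simp [hm] <;> omega
      · have hxi' : ¬ i = x := fun h => hxi h.symm
        by_cases hm : x ∈ acc <;> simp [hm, hxi, hxi']
    · rw [if_neg h2, IHt]
      rw [hgi, beq_iff_eq] at h2
      simp only [PySem.Dict.getD_modify, List.count_cons]
      by_cases hxi : x = i
      · subst hxi
        by_cases hm : x ∈ acc <;> simp [hm] <;> omega
      · have hxi' : ¬ i = x := fun h => hxi h.symm
        by_cases hm : x ∈ acc <;> simp [hm, hxi, hxi']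

lemma pvDups_nodup (l : List String) : ∀ (d : PySem.Dict String Int) (acc : List String),
    acc.Nodup → (∀ x ∈ acc, 2 ≤ d.getD x 0) →
    ((l.foldl (fun (sd : PySem.Dict String Int × List String) i =>
        let seen := sd.1.modify i 0 (· + 1)
        if seen.getD i 0 == 2 then (seen, sd.2 ++ [i]) else (seen, sd.2)) (d, acc)).2).Nodup := by
  induction l with
  | nil => intro d acc h _; simpa using h
  | cons i t IHt =>
    intro d acc hnd hge
    rw [List.foldl_cons]
    have hstep : (let seen := (d, acc).1.modify i 0 (· + 1)
        if seen.getD i 0 == 2 then (seen, (d, acc).2 ++ [i]) else (seen, (d, acc).2)) =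
        (if (d.modify i 0 (· + 1)).getD i 0 == 2 then (d.modify i 0 (· + 1), acc ++ [i])
         else (d.modify i 0 (· + 1), acc)) := by
      by_cases h : (d.modify i 0 (· + 1)).getD i 0 == 2 <;> simp [h]
    rw [hstep]
    have hgi : (d.modify i 0 (· + 1)).getD i 0 = d.getD i 0 + 1 := by
      simp [PySem.Dict.getD_modify_self]
    by_cases h2 : ((d.modify i 0 (· + 1)).getD i 0 == 2)
    · rw [if_pos h2]
      rw [hgi, beq_iff_eq] at h2
      have hni : i ∉ acc := fun hmem => by have := hge i hmem; omega
      apply IHt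
      · simp only [List.nodup_append, List.nodup_singleton, true_and]
        refine ⟨hnd, ?_⟩
        intro a ha b hb heq
        rw [List.mem_singleton] at hb
        subst hb
        exact hni (heq ▸ ha)
      · intro x hx
        simp only [PySem.Dict.getD_modify]
        rcases List.mem_append.mp hx with hx | hx
        · have hx2 := hge x hx
          by_cases hxi : x = i
          · subst hxi; simp; omega
          · simp [hxi]; omega
        · simp only [List.mem_singleton] at hx
          subst hx
          simp
          omega
    · rw [if_neg h2]
      rw [hgi, beq_iff_eq] at h2
      apply IHt _ _ hnd
      intro x hx
      have hx2 := hge x hx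
      simp only [PySem.Dict.getD_modify]
      by_cases hxi : x = i
      · subst hxi; simp; omega
      · simp [hxi]; omega

lemma pvDups_sorted_eq (ids : List String) :
    PySem.List.sorted ((ids.foldl (fun (sd : PySem.Dict String Int × List String) i =>
        let seen := sd.1.modify i 0 (· + 1)
        if seen.getD i 0 == 2 then (seen, sd.2 ++ [i]) else (seen, sd.2))
      (PySem.Dict.empty, [])).2) (fun x => x) false =
    PySem.List.sorted (((ids.foldl (fun (d : PySem.Dict String Int) i =>
        d.insert i (d.getD i 0 + 1)) PySem.Dict.empty).items.filter
      (fun kv => 2 ≤ kv.2)).map (·.1)) (fun x => x) false := by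
  rw [PySem.Dict.foldl_insert_getD_add_one_eq_counter, PySem.Dict.items_counter]
  rw [List.filter_map, List.map_map]
  apply PySem.List.sorted_eq_sorted_of_perm _ _ _ Function.injective_id
  apply (List.perm_ext_iff_of_nodup ?nodA ?nodB).mpr
  case nodA =>
    exact pvDups_nodup ids PySem.Dict.empty [] List.nodup_nil (by simp)
  case nodB =>
    exact List.Nodup.map (fun a b h => h) ((PySem.Set.nodup_ofList ids).filter _)
  intro x
  rw [pvDups_mem]
  simp only [List.mem_nil_iff, false_or, PySem.Dict.getD_empty, List.mem_map, List.mem_filter,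
    PySem.Set.mem_ofList, Function.comp]
  constructor
  · rintro ⟨h1, h2⟩
    refine ⟨x, ⟨⟨?_, ?_⟩, rfl⟩⟩
    · have : 0 < ids.count x := by omega
      exact List.count_pos_iff.mp this
    · simp only [decide_eq_true_eq]
      omega
  · rintro ⟨y, ⟨⟨hy, hc⟩, rfl⟩⟩
    simp only [decide_eq_true_eq] at hc
    omega

-- ---- bad parents: filtering comprehension vs set difference ----
lemma pvBad_sorted_eq (parents : List String) (idset : PySem.Set String) :
    PySem.List.sorted
      (PySem.Set.ofList (parents.filter (fun p => !(p == "") && !(PySem.Set.contains idset p))))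
      (fun x => x) false =
    PySem.List.sorted
      (PySem.Set.diff (PySem.Set.diff (PySem.Set.ofList parents) idset) [""]) (fun x => x) false := by
  apply PySem.List.sorted_eq_sorted_of_perm _ _ _ Function.injective_id
  apply (List.perm_ext_iff_of_nodup (PySem.Set.nodup_ofList _)
    (PySem.Set.nodup_diff _ _ (PySem.Set.nodup_diff _ _ (PySem.Set.nodup_ofList parents)))).mpr
  intro x
  simp only [PySem.Set.mem_ofList, List.mem_filter, PySem.Set.mem_diff, List.mem_singleton,
    Bool.and_eq_true, Bool.not_eq_true', beq_eq_false_iff_ne, ne_eq]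
  rw [show (idset.contains x = false) = (x ∉ idset) from propext (by
    rw [← PySem.Set.contains_iff]; simp)]
  tauto

-- ===== VERDICT (by name: the statement is the Claim_ definition above) =====
theorem validate_tree_spec : Claim_equal_validate_tree := by
  intro rows hdom hpre
  unfold Spec_validate_tree
  simp only [validate_tree, validate_tree_alt]
  have hdup := pvDups_sorted_eq (pvIds rows)
  have hdup0 : ((pvIds rows).foldl (fun (sd : PySem.Dict String Int × List String) i =>
        let seen := sd.1.modify i 0 (· + 1)
        if seen.getD i 0 == 2 then (seen, sd.2 ++ [i]) else (seen, sd.2))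
      (PySem.Dict.empty, [])).2 = [] ↔
      PySem.List.sorted ((((pvIds rows).foldl (fun (d : PySem.Dict String Int) i =>
        d.insert i (d.getD i 0 + 1)) PySem.Dict.empty).items.filter
      (fun kv => 2 ≤ kv.2)).map (·.1)) (fun x => x) false = [] := by
    rw [← hdup, PySem.List.sorted_eq_nil_iff]
  have hbad := pvBad_sorted_eq (pvParents rows) (PySem.Set.ofList (pvIds rows))
  have hcyc := pvRoots_eq (pvChildren (pvIds rows) (pvParents rows))
    (PySem.Set.union (PySem.Set.ofList (pvParents rows)) [""]) (4 * rows.length + 8)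
    (PySem.Set.empty, PySem.Set.empty)
  simp only [hdup, propext hdup0, hbad, hcyc]
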